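-- pv_equiv track=rewrite | github.com/sakshar/repeat_assembler | src/from_clusters_to_assembly.py | dfs
-- ===== SOURCE A (Python) =====
-- def dfs(data, path, paths):
--     datum = path[-1]
--     if datum in data:
--         for val in data[datum]:
--             new_path = path + [val]
--             paths = dfs(data, new_path, paths)
--     else:
--         paths += [path]
--     return paths
-- ===== SOURCE B (Python) =====
-- def dfs(data, path, paths):
--     # Iterative DFS with an explicit stack instead of recursion.
--     # Children are pushed in reversed order so leaf paths are emitted in
--     # the same left-to-right pre-order as A's recursion.
--     stack = [path]
--     while stack:
--         p = stack.pop()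
--         last = p[-1]
--         if last in data:
--             for v in reversed(data[last]):
--                 stack.append(p + [v])
--         else:
--             paths += [p]
--     return paths
-- ===== Notes on version B (the rewrite author's own statement) =====
-- stated objective: alternative
-- what changed: B replaces A's accumulator-threading recursion by an iterative depth-first search over an explicit stack of partial paths (children pushed in reversed order to preserve A's left-to-right emission order).
import Mathlib
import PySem

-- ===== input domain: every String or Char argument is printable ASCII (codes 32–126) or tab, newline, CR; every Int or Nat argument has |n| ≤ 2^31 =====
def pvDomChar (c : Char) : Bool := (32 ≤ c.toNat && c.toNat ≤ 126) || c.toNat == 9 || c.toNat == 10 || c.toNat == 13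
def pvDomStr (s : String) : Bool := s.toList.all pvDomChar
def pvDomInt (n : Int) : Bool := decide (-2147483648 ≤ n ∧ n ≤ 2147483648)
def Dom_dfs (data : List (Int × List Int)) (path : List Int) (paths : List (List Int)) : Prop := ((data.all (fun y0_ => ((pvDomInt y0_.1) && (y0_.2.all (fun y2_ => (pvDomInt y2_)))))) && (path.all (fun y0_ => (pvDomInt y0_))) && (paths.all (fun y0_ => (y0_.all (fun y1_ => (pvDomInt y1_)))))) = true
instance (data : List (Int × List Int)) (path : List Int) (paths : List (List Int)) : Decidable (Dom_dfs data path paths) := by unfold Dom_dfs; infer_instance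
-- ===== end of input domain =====

-- B replaces A's accumulator-threading recursion by an iterative DFS over an explicit stack;
-- same cost. Both A and B mutate `paths` in place; the equivalence proved is about the return value.

-- ===== PORT A =====
-- A's recursion threads `paths` through every call. The recursion depth is bounded by
-- data.length + 1 on every input admitted by Pre_dfs (acyclic reachable part), so the
-- port carries that much fuel; fuel 0 (a cyclic input, excluded by Pre_dfs, where
-- Python A raises RecursionError) returns the accumulator as-is.
def dfsFuelA (fuel : Nat) (data : List (Int × List Int)) (path : List Int) (paths : List (List Int)) : List (List Int) :=
  match fuel with
  | 0 => paths
  | fuel + 1 =>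
    match PySem.List.pyGet? path (-1) with
    | none => paths  -- Python raises IndexError here (empty path); excluded by Pre_dfs
    | some datum =>
      match PySem.Dict.get? (PySem.Dict.mk data) datum with
      | some vals => vals.foldl (fun ps val => dfsFuelA fuel data (path ++ [val]) ps) paths
      | none => paths ++ [path]

def dfs (data : List (Int × List Int)) (path : List Int) (paths : List (List Int)) : List (List Int) :=
  dfsFuelA (data.length + 1) data path paths

-- ===== PORT B =====
-- Iterative DFS with an explicit stack, as in Source B. The Lean stack's HEAD is the top of
-- Python's stack (Python pops from the list's end); Python's `extend(reversed(children))`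
-- therefore becomes prepending the children IN ORDER. Each stack entry carries the same
-- depth budget as A's port (data.length + 1 at the seed), so both ports cut off cyclic
-- inputs (excluded by Pre_dfs, where Python B loops forever) identically.
def pvBranch (data : List (Int × List Int)) : Nat := (data.flatMap Prod.snd).length + 1

theorem pv_vals_le (data : List (Int × List Int)) (k : Int) (vals : List Int)
    (h : PySem.Dict.get? (PySem.Dict.mk data) k = some vals) :
    vals.length ≤ (data.flatMap Prod.snd).length := by
  induction data with
  | nil => simp [PySem.Dict.get?] at h
  | cons kv rest ih =>
    obtain ⟨k0, v0⟩ := kv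
    rw [PySem.Dict.get?_mk_cons] at h
    by_cases hk : (k0 == k) = true
    · simp [hk] at h
      simp only [List.flatMap_cons, List.length_append, h]
      omega
    · simp [hk] at h
      have := ih h
      simp only [List.flatMap_cons, List.length_append]
      omega

def loopB (data : List (Int × List Int)) (stack : List (Nat × List Int)) (acc : List (List Int)) : List (List Int) :=
  match stack with
  | [] => acc
  | (0, _) :: rest => loopB data rest acc  -- depth budget exhausted (cyclic input, excluded by Pre_dfs)
  | (f + 1, p) :: rest =>
    match PySem.List.pyGet? p (-1) with
    | none => loopB data rest acc  -- Python raises IndexError here (empty p); excluded by Pre_dfs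
    | some last =>
      match h : PySem.Dict.get? (PySem.Dict.mk data) last with
      | some vals => loopB data ((vals.map (fun v => (f, p ++ [v]))) ++ rest) acc
      | none => loopB data rest (acc ++ [p])
termination_by (stack.map (fun it => (pvBranch data) ^ it.1)).sum
decreasing_by
  · have h1 : 0 < pvBranch data ^ (0 : Nat) := Nat.pow_pos (by simp [pvBranch])
    simp only [List.map_cons, List.sum_cons, Nat.succ_eq_add_one] at *
    omega
  · have h1 : 0 < pvBranch data ^ (f + 1) := Nat.pow_pos (by simp [pvBranch])
    simp only [List.map_cons, List.sum_cons, Nat.succ_eq_add_one] at *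
    omega
  · have hv : vals.length < pvBranch data := by
      have h2 := pv_vals_le data last vals h
      simp only [pvBranch]
      omega
    have hC : 0 < pvBranch data := by simp [pvBranch]
    have hlt : vals.length * pvBranch data ^ f < pvBranch data ^ (f + 1) := by
      calc vals.length * pvBranch data ^ f
          < pvBranch data * pvBranch data ^ f := (Nat.mul_lt_mul_right (Nat.pow_pos hC)).mpr hv
        _ = pvBranch data ^ (f + 1) := by ring
    have he : (List.map (fun it => pvBranch data ^ it.1) (List.map (fun v => (f, p ++ [v])) vals)).sum
        = vals.length * pvBranch data ^ f := by
      rw [List.map_map]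
      simp [Function.comp_def, List.map_const', List.sum_replicate]
    simp only [List.map_append, List.sum_append, List.map_cons, List.sum_cons, he,
      Nat.succ_eq_add_one]
    omega
  · have h1 : 0 < pvBranch data ^ (f + 1) := Nat.pow_pos (by simp [pvBranch])
    simp only [List.map_cons, List.sum_cons, Nat.succ_eq_add_one] at *
    omega

def dfs_alt (data : List (Int × List Int)) (path : List Int) (paths : List (List Int)) : List (List Int) :=
  loopB data [(data.length + 1, path)] paths

-- ===== PRECONDITION & SPEC =====
-- helpers for Pre_: bounded reachability in the successor graph of `data`
def pvSucc (data : List (Int × List Int)) (x : Int) : List Int := (PySem.Dict.get? (PySem.Dict.mk data) x).getD []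
def pvStep (data : List (Int × List Int)) (s : List Int) : List Int := (s ++ s.flatMap (pvSucc data)).dedup
def pvReach (data : List (Int × List Int)) (s : List Int) : List Int :=
  (List.range (data.length + 1)).foldl (fun t _ => pvStep data t) s

-- Pre_ excludes exactly the inputs where Python A does not return: an empty `path`
-- (IndexError on path[-1]) and inputs where a node reachable from path[-1] can reach
-- itself (RecursionError in A; an infinite loop in B).
def Pre_dfs (data : List (Int × List Int)) (path : List Int) (paths : List (List Int)) : Prop :=
  path ≠ [] ∧ ∀ x ∈ pvReach data path.getLast?.toList, x ∉ pvReach data (pvSucc data x)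
instance (data : List (Int × List Int)) (path : List Int) (paths : List (List Int)) : Decidable (Pre_dfs data path paths) := by unfold Pre_dfs; infer_instance

def pvWitness_dfs : (List (Int × List Int)) × List Int × List (List Int) := ([(0, [1, 2]), (2, [3])], [0], [[7]])

def Spec_dfs (data : List (Int × List Int)) (path : List Int) (paths : List (List Int)) (out : List (List Int)) : Prop := out = dfs_alt data path paths
instance (data : List (Int × List Int)) (path : List Int) (paths : List (List Int)) (out : List (List Int)) : Decidable (Spec_dfs data path paths out) := by unfold Spec_dfs; infer_instance

-- ===== CLAIM (what is proved, stated in full; the proofs are below) =====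
def Claim_equal_dfs : Prop := ∀ (data : List (Int × List Int)) (path : List Int) (paths : List (List Int)), Dom_dfs data path paths → Pre_dfs data path paths → Spec_dfs data path paths (dfs data path paths)

-- ===== LEMMAS AND PROOFS =====
-- pure expansion: the common value both ports compute (proof-only helper)
def pvExpand (fuel : Nat) (data : List (Int × List Int)) (p : List Int) : List (List Int) :=
  match fuel with
  | 0 => []
  | fuel + 1 =>
    match PySem.List.pyGet? p (-1) with
    | none => []
    | some last =>
      match PySem.Dict.get? (PySem.Dict.mk data) last with
      | some vals => vals.flatMap (fun v => pvExpand fuel data (p ++ [v]))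
      | none => [p]

theorem foldl_dfsA (fuel : Nat) (data : List (Int × List Int)) (path : List Int)
    (ih : ∀ (p : List Int) (ps : List (List Int)), dfsFuelA fuel data p ps = ps ++ pvExpand fuel data p) :
    ∀ (vals : List Int) (paths : List (List Int)),
      vals.foldl (fun ps val => dfsFuelA fuel data (path ++ [val]) ps) paths
        = paths ++ vals.flatMap (fun v => pvExpand fuel data (path ++ [v])) := by
  intro vals
  induction vals with
  | nil => intro paths; simp
  | cons v vs _ => intro paths; simp [List.foldl_cons, ih, List.append_assoc, List.flatMap]

theorem dfsFuelA_eq_pvExpand (fuel : Nat) (data : List (Int × List Int)) :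
    ∀ (path : List Int) (paths : List (List Int)),
      dfsFuelA fuel data path paths = paths ++ pvExpand fuel data path := by
  induction fuel with
  | zero => intro path paths; simp [dfsFuelA, pvExpand]
  | succ f ih =>
    intro path paths
    simp only [dfsFuelA, pvExpand]
    cases PySem.List.pyGet? path (-1) with
    | none => simp
    | some datum =>
      cases h2 : PySem.Dict.get? (PySem.Dict.mk data) datum with
      | none => simp [h2]
      | some vals => simpa [h2] using foldl_dfsA f data path ih vals paths

theorem loopB_eq_pvExpand (data : List (Int × List Int)) :
    ∀ (stack : List (Nat × List Int)) (acc : List (List Int)),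
      loopB data stack acc = acc ++ stack.flatMap (fun it => pvExpand it.1 data it.2) := by
  intro stack acc
  induction stack, acc using loopB.induct data with
  | case1 acc => simp [loopB]
  | case2 acc p rest ih => simp [loopB, pvExpand, ih]
  | case3 acc f p rest hget ih =>
    simp [loopB, hget, pvExpand, ih]
  | case4 acc f p rest last hget vals hvals ih =>
    rw [loopB]
    simp only [hget]
    split
    · rename_i vals' h'
      rw [hvals] at h'
      injection h' with h''
      subst h''
      rw [ih]
      simp [pvExpand, hget, hvals, List.flatMap_append, List.flatMap_map]
    · rename_i h'
      rw [hvals] at h'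
      cases h'
  | case5 acc f p rest last hget hvals ih =>
    rw [loopB]
    simp only [hget]
    split
    · rename_i vals' h'
      rw [hvals] at h'
      cases h'
    · rw [ih]
      simp [pvExpand, hget, hvals]

-- ===== VERDICT (by name: the statement is the Claim_ definition above) =====
theorem dfs_spec : Claim_equal_dfs := by
  intro data path paths _ _
  show dfs data path paths = dfs_alt data path paths
  rw [dfs, dfs_alt, dfsFuelA_eq_pvExpand, loopB_eq_pvExpand]
  simp
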